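-- pv_equiv track=rewrite | github.com/CheeseLad/ca268 | week-04/exam-prep.py | move_vow
-- ===== SOURCE A (Python) =====
-- def move_vow(string):
--   vowels = ["A", "E", "I", "O", "U", "a", "e", "i", "o", "u"]
--   vowel_list = []
--   consonant_list = []
--   for s in string:
--     if s in vowels:
--       vowel_list.append(s)
--     else:
--       consonant_list.append(s)
--   return "".join(vowel_list + consonant_list)
-- ===== SOURCE B (Python) =====
-- def move_vow(string):
--   vowels = ["A", "E", "I", "O", "U", "a", "e", "i", "o", "u"]
--   return "".join(sorted(string, key=lambda c: c not in vowels))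
-- ===== Notes on version B (the rewrite author's own statement) =====
-- stated objective: simpler
-- what changed: Replaced the explicit partition loop with two accumulator lists by a single stable sort keyed on consonant-ness, which places vowels first while preserving each group's order.
import Mathlib
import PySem

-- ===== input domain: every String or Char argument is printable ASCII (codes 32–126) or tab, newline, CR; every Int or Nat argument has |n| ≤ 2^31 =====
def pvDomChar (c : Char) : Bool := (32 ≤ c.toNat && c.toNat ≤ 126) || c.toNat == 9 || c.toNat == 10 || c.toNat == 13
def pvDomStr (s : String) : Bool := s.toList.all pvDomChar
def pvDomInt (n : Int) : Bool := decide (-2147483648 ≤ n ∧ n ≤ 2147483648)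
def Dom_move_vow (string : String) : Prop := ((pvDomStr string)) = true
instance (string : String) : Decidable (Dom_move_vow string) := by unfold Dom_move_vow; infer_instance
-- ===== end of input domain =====

-- B replaces A's explicit partition loop by one stable sort keyed on "is consonant" (simpler).

-- ===== PORT A =====
def pvVowels : List Char := ['A', 'E', 'I', 'O', 'U', 'a', 'e', 'i', 'o', 'u']

def move_vow (string : String) : String :=
  let acc := string.toList.foldl
    (fun (p : List Char × List Char) s =>
      if s ∈ pvVowels then (p.1 ++ [s], p.2) else (p.1, p.2 ++ [s]))
    ([], [])
  String.mk (acc.1 ++ acc.2)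

-- ===== PORT B =====
-- key: Python's bool (c not in vowels) ported as Nat 0/1 (False < True)
def move_vow_alt (string : String) : String :=
  String.mk (PySem.List.sorted string.toList
    (fun c => if c ∈ pvVowels then (0 : Nat) else 1) false)

-- ===== PRECONDITION & SPEC =====
def Spec_move_vow (string : String) (out : String) : Prop := out = move_vow_alt string
instance (string : String) (out : String) : Decidable (Spec_move_vow string out) := by unfold Spec_move_vow; infer_instance

-- ===== CLAIM (what is proved, stated in full; the proofs are below) =====
def Claim_equal_move_vow : Prop := ∀ (string : String), Dom_move_vow string → Spec_move_vow string (move_vow string)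

-- ===== LEMMAS AND PROOFS =====

-- insertBy pushes a vowel past the vowel block and before the consonant block
theorem pv_insert_vowel (x : Char) (v c : List Char)
    (hx : x ∈ pvVowels) (hv : ∀ a ∈ v, a ∈ pvVowels) (hc : ∀ a ∈ c, a ∉ pvVowels) :
    PySem.List.insertBy
      (fun a b => decide ((if a ∈ pvVowels then (0 : Nat) else 1) < if b ∈ pvVowels then 0 else 1))
      x (v ++ c) = v ++ x :: c := by
  induction v with
  | nil =>
    cases c with
    | nil => rfl
    | cons y ys =>
      have := hc y (by simp)
      simp [PySem.List.insertBy, hx, this]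
  | cons a v ih =>
    have ha := hv a (by simp)
    simp only [List.cons_append, PySem.List.insertBy, hx, ha, if_true]
    rw [if_neg (by simp), ih (fun b hb => hv b (by simp [hb]))]

-- insertBy pushes a consonant to the very end
theorem pv_insert_cons (x : Char) (l : List Char) (hx : x ∉ pvVowels) :
    PySem.List.insertBy
      (fun a b => decide ((if a ∈ pvVowels then (0 : Nat) else 1) < if b ∈ pvVowels then 0 else 1))
      x l = l ++ [x] := by
  induction l with
  | nil => rfl
  | cons a l ih =>
    simp only [PySem.List.insertBy, hx, if_false]
    rw [if_neg (by split <;> simp), ih]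
    rfl

theorem pv_sorted_eq_partition (xs : List Char) :
    PySem.List.sorted xs (fun c => if c ∈ pvVowels then (0 : Nat) else 1) false
      = xs.filter (fun c => decide (c ∈ pvVowels))
        ++ xs.filter (fun c => !decide (c ∈ pvVowels)) := by
  rw [PySem.List.sorted_eq_foldl_insertBy]
  induction xs using List.reverseRecOn with
  | nil => rfl
  | append_singleton xs x ih =>
    rw [List.foldl_append, List.foldl_cons, List.foldl_nil, ih]
    by_cases hx : x ∈ pvVowels
    · rw [pv_insert_vowel x _ _ hx
        (fun a ha => by have := (List.mem_filter.mp ha).2; simpa using this)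
        (fun a ha => by have := (List.mem_filter.mp ha).2; simpa using this)]
      simp [List.filter_append, hx]
    · rw [pv_insert_cons x _ hx]
      simp [List.filter_append, hx]

theorem pv_foldl_partition (xs v c : List Char) :
    xs.foldl (fun (p : List Char × List Char) s =>
        if s ∈ pvVowels then (p.1 ++ [s], p.2) else (p.1, p.2 ++ [s])) (v, c)
      = (v ++ xs.filter (fun s => decide (s ∈ pvVowels)),
         c ++ xs.filter (fun s => !decide (s ∈ pvVowels))) := by
  induction xs generalizing v c with
  | nil => simp
  | cons x xs ih =>
    by_cases hx : x ∈ pvVowels <;> simp [hx, ih]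

-- ===== VERDICT (by name: the statement is the Claim_ definition above) =====
theorem move_vow_spec : Claim_equal_move_vow := by
  intro s _
  show _ = _
  unfold move_vow move_vow_alt
  rw [pv_sorted_eq_partition, pv_foldl_partition]
  simp
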